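-- pv_equiv track=rewrite | github.com/DataViking-Tech/SynthPanel | src/synth_panel/ensemble.py | _match_to_option
-- ===== SOURCE A (Python) =====
-- def _match_to_option(value: str, options: list[str]) -> str:
--     """Match a response value to the closest option from a defined list.
--
--     Matching strategy (first match wins):
--     1. Exact match (case-insensitive)
--     2. Option is a substring of the response (case-insensitive),
--        preferring the longest matching option
--     3. Response is a substring of an option (case-insensitive),
--        preferring the longest matching option
--
--     Returns the original option string (preserving case) on match,
--     or the original value if no match is found.
--     """
--     val_lower = value.lower()
--
--     # 1. Exact match
--     for opt in options:
--         if val_lower == opt.lower():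
--             return opt
--
--     # 2. Option contained in response (longest wins)
--     contained: list[str] = []
--     for opt in options:
--         if opt.lower() in val_lower:
--             contained.append(opt)
--     if contained:
--         return max(contained, key=len)
--
--     # 3. Response contained in option (longest matching option wins)
--     reverse_contained: list[str] = []
--     for opt in options:
--         if val_lower in opt.lower():
--             reverse_contained.append(opt)
--     if reverse_contained:
--         return max(reverse_contained, key=len)
--
--     return value
-- ===== SOURCE B (Python) =====
-- def _match_to_option(value: str, options: list[str]) -> str:
--     """Single pass over options keeping two running candidates instead of
--     three separate scans + list building + max()."""
--     val_lower = value.lower()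
--     best_forward = None   # longest option contained in the response
--     best_reverse = None   # longest option containing the response
--     for opt in options:
--         opt_lower = opt.lower()
--         if val_lower == opt_lower:
--             return opt
--         if opt_lower in val_lower:
--             if best_forward is None or len(opt) > len(best_forward):
--                 best_forward = opt
--         if val_lower in opt_lower:
--             if best_reverse is None or len(opt) > len(best_reverse):
--                 best_reverse = opt
--     if best_forward is not None:
--         return best_forward
--     if best_reverse is not None:
--         return best_reverse
--     return value
-- ===== Notes on version B (the rewrite author's own statement) =====
-- stated objective: alternative
-- what changed: A makes three sequential scans (exact-match loop, build a 'contained' list then max(key=len), build a 'reverse_contained' list then max(key=len)); B is a single pass over options that returns on an exact match and otherwise maintains two running best candidates (strictly-longer updates reproduce max's first-of-equal-length tie-break), building no intermediate lists.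
import Mathlib
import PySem

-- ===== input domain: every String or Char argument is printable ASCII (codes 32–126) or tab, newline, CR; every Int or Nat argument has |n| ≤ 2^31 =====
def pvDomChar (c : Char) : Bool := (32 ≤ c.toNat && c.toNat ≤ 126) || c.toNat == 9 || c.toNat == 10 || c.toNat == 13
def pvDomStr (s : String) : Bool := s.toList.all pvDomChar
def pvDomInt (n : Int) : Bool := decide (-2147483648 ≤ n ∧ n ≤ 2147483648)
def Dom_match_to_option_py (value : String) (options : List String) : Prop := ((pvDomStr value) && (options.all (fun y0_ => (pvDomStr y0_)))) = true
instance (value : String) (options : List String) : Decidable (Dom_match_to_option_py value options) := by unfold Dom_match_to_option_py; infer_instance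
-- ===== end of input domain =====

-- B fuses A's three sequential scans (exact / contained / reverse-contained) into one
-- pass keeping two running candidates; same return value, no list building or max() pass.

-- ===== PORT A =====
def match_to_option_py (value : String) (options : List String) : String :=
  let valLower := PySem.Str.lower value
  -- 1. exact match: first option with equal lowercase form (early-return loop)
  match options.find? (fun opt => valLower == PySem.Str.lower opt) with
  | some opt => opt
  | none =>
    -- 2. option contained in response (longest wins)
    let contained := options.foldl
      (fun acc opt => if PySem.Str.isIn (PySem.Str.lower opt) valLower then acc ++ [opt] else acc) []
    if !contained.isEmpty then
      (PySem.List.max? contained PySem.Str.len).getD value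
    else
      -- 3. response contained in option (longest wins)
      let reverseContained := options.foldl
        (fun acc opt => if PySem.Str.isIn valLower (PySem.Str.lower opt) then acc ++ [opt] else acc) []
      if !reverseContained.isEmpty then
        (PySem.List.max? reverseContained PySem.Str.len).getD value
      else value

-- ===== PORT B =====
-- the "best_forward is None or len(opt) > len(best)" candidate update of Source B
def pvBest (p : String → Bool) (best : Option String) (opt : String) : Option String :=
  if p opt then
    match best with
    | none => some opt
    | some b => if PySem.Str.len b < PySem.Str.len opt then some opt else some b
  else best

-- the single for-loop of Source B over options with the two running candidates
def pvScan (valLower value : String) : List String → Option String → Option String → String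
  | [], bestF, bestR =>
    match bestF with
    | some b => b
    | none =>
      match bestR with
      | some r => r
      | none => value
  | opt :: rest, bestF, bestR =>
    if valLower == PySem.Str.lower opt then opt
    else pvScan valLower value rest
      (pvBest (fun o => PySem.Str.isIn (PySem.Str.lower o) valLower) bestF opt)
      (pvBest (fun o => PySem.Str.isIn valLower (PySem.Str.lower o)) bestR opt)

def match_to_option_py_alt (value : String) (options : List String) : String :=
  pvScan (PySem.Str.lower value) value options none none

-- ===== PRECONDITION & SPEC =====
def Spec_match_to_option_py (value : String) (options : List String) (out : String) : Prop := out = match_to_option_py_alt value options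
instance (value : String) (options : List String) (out : String) : Decidable (Spec_match_to_option_py value options out) := by unfold Spec_match_to_option_py; infer_instance

-- ===== CLAIM (what is proved, stated in full; the proofs are below) =====
def Claim_equal_match_to_option_py : Prop := ∀ (value : String) (options : List String), Dom_match_to_option_py value options → Spec_match_to_option_py value options (match_to_option_py value options)

-- ===== LEMMAS AND PROOFS =====

-- the scan with accumulators equals: first exact match, else the two folded candidates
theorem pvScan_eq (valLower value : String) (l : List String)
    (bF bR : Option String) :
    pvScan valLower value l bF bR =
      match l.find? (fun o => valLower == PySem.Str.lower o) with
      | some o => o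
      | none =>
        match l.foldl (pvBest (fun o => PySem.Str.isIn (PySem.Str.lower o) valLower)) bF with
        | some b => b
        | none =>
          match l.foldl (pvBest (fun o => PySem.Str.isIn valLower (PySem.Str.lower o))) bR with
          | some r => r
          | none => value := by
  induction l generalizing bF bR with
  | nil => rfl
  | cons o rest ih =>
    by_cases h : (valLower == PySem.Str.lower o) = true
    · simp [pvScan, List.find?, h]
    · simp only [pvScan, List.find?, h, List.foldl, Bool.false_eq_true, if_false]
      exact ih _ _

-- A's accumulating "contained" loop builds exactly the filtered list
theorem contained_eq_filter (p : String → Bool) (l : List String) (acc : List String) :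
    l.foldl (fun a o => if p o then a ++ [o] else a) acc = acc ++ l.filter p := by
  induction l generalizing acc with
  | nil => simp
  | cons o rest ih =>
    by_cases h : p o = true
    · simp [List.foldl, List.filter, h, ih]
    · simp [List.foldl, List.filter, h, ih]

-- folding pvBest p over l = folding the bare candidate update over (l.filter p)
theorem foldl_pvBest (p : String → Bool) (l : List String) (acc : Option String) :
    l.foldl (pvBest p) acc =
      (l.filter p).foldl (fun best opt =>
        match best with
        | none => some opt
        | some b => if PySem.Str.len b < PySem.Str.len opt then some opt else some b) acc := by
  induction l generalizing acc with
  | nil => rfl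
  | cons o rest ih =>
    by_cases h : p o = true
    · simp [List.filter, h, List.foldl, pvBest, ih]
    · simp [List.filter, h, List.foldl, pvBest, ih]

-- the bare candidate fold from none is exactly PySem.List.max? with key len
theorem foldl_best_eq_max? (m : List String) :
    m.foldl (fun best opt =>
        match best with
        | none => some opt
        | some b => if PySem.Str.len b < PySem.Str.len opt then some opt else some b) none
      = PySem.List.max? m PySem.Str.len := by
  unfold PySem.List.max?
  congr 1
  funext a b
  cases a with
  | none => rfl
  | some c => simp

-- ===== VERDICT (by name: the statement is the Claim_ definition above) =====
theorem match_to_option_py_spec : Claim_equal_match_to_option_py := by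
  intro value options _
  unfold Spec_match_to_option_py
  simp only [match_to_option_py, match_to_option_py_alt]
  rw [pvScan_eq, foldl_pvBest, foldl_pvBest, foldl_best_eq_max?, foldl_best_eq_max?,
    contained_eq_filter (fun o => PySem.Str.isIn (PySem.Str.lower o) (PySem.Str.lower value)),
    contained_eq_filter (fun o => PySem.Str.isIn (PySem.Str.lower value) (PySem.Str.lower o)),
    List.nil_append, List.nil_append]
  cases hfind : options.find? (fun o => PySem.Str.lower value == PySem.Str.lower o) with
  | some o => rfl
  | none =>
    cases hF : options.filter (fun o => PySem.Str.isIn (PySem.Str.lower o) (PySem.Str.lower value)) with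
    | cons x xs =>
      cases hm : PySem.List.max? (x :: xs) PySem.Str.len with
      | none => exact absurd ((PySem.List.max?_eq_none_iff _ _).mp hm) (by simp)
      | some b => rfl
    | nil =>
      cases hR : options.filter (fun o => PySem.Str.isIn (PySem.Str.lower value) (PySem.Str.lower o)) with
      | cons y ys =>
        cases hm : PySem.List.max? (y :: ys) PySem.Str.len with
        | none => exact absurd ((PySem.List.max?_eq_none_iff _ _).mp hm) (by simp)
        | some r => rfl
      | nil => rfl
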